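-- pv_equiv track=rewrite | github.com/CharlesLakes/AdventOfCode | 2022/18-2.py | limites
-- ===== SOURCE A (Python) =====
-- def limites(cords):
--     xs = []
--     ys = []
--     zs = []
--
--     for c in cords:
--         x,y,z = c
--         xs.append(x)
--         ys.append(y)
--         zs.append(z)
--
--     return max(xs),max(ys),max(zs)
-- ===== SOURCE B (Python) =====
-- def limites(cords):
--     it = iter(cords)
--     try:
--         mx, my, mz = next(it)
--     except StopIteration:
--         raise ValueError("max() arg is an empty sequence")
--     for x, y, z in it:
--         if x > mx: mx = x
--         if y > my: my = y
--         if z > mz: mz = z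
--     return (mx, my, mz)
-- ===== Notes on version B (the rewrite author's own statement) =====
-- stated objective: simpler
-- what changed: Replaces building three intermediate coordinate lists and then scanning each with max() by a single streaming pass that keeps three running maxima seeded from the first tuple.
import Mathlib
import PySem

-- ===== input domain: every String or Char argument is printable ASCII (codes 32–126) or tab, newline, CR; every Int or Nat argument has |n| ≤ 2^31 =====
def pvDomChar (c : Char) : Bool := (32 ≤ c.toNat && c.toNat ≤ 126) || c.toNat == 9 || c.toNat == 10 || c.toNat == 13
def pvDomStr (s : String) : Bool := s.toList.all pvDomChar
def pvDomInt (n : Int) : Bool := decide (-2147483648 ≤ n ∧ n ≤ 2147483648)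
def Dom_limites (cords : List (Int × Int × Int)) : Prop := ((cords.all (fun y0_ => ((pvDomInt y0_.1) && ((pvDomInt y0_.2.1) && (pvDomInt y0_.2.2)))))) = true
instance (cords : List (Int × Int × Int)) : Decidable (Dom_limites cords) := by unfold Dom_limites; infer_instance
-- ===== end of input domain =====

-- B replaces A's three intermediate lists + three max() scans with one streaming pass
-- keeping three running maxima; both raise ValueError on [] (excluded by Pre_).

-- ===== PORT A =====
-- A: build xs, ys, zs by appending in one loop, then take max of each list.
-- max([]) raises ValueError → PySem.List.max? = none there; Pre_ excludes []; getD 0 only totalizes.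
def limites (cords : List (Int × Int × Int)) : Int × Int × Int :=
  let acc := cords.foldl
    (fun (acc : List Int × List Int × List Int) c =>
      (acc.1 ++ [c.1], acc.2.1 ++ [c.2.1], acc.2.2 ++ [c.2.2]))
    ([], [], [])
  ((PySem.List.max? acc.1 (fun v => v)).getD 0,
   (PySem.List.max? acc.2.1 (fun v => v)).getD 0,
   (PySem.List.max? acc.2.2 (fun v => v)).getD 0)

-- ===== PORT B =====
-- B: running maxima seeded from the first tuple, one pass over the rest.
def limitesAltLoop (mx my mz : Int) : List (Int × Int × Int) → Int × Int × Int
  | [] => (mx, my, mz)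
  | c :: rest =>
      limitesAltLoop (if c.1 > mx then c.1 else mx)
                     (if c.2.1 > my then c.2.1 else my)
                     (if c.2.2 > mz then c.2.2 else mz) rest

def limites_alt (cords : List (Int × Int × Int)) : Int × Int × Int :=
  match cords with
  | [] => (0, 0, 0)  -- unreachable under Pre_: Python B raises ValueError here
  | c :: rest => limitesAltLoop c.1 c.2.1 c.2.2 rest

-- ===== PRECONDITION & SPEC =====
-- Pre_ excludes only the empty list, on which both Pythons raise ValueError (max of empty / explicit raise).
def Pre_limites (cords : List (Int × Int × Int)) : Prop := cords ≠ []
instance (cords : List (Int × Int × Int)) : Decidable (Pre_limites cords) := by unfold Pre_limites; infer_instance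
def pvWitness_limites : (List (Int × Int × Int)) := [(1, 2, 3), (-4, 5, 0)]

def Spec_limites (cords : List (Int × Int × Int)) (out : Int × Int × Int) : Prop := out = limites_alt cords
instance (cords : List (Int × Int × Int)) (out : Int × Int × Int) : Decidable (Spec_limites cords out) := by unfold Spec_limites; infer_instance

-- ===== CLAIM (what is proved, stated in full; the proofs are below) =====
def Claim_equal_limites : Prop := ∀ (cords : List (Int × Int × Int)), Dom_limites cords → Pre_limites cords → Spec_limites cords (limites cords)

-- ===== LEMMAS AND PROOFS =====

-- A's append-loop builds exactly the three coordinate projections.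
theorem limites_foldl_lists (cords : List (Int × Int × Int))
    (xs ys zs : List Int) :
    cords.foldl
      (fun (acc : List Int × List Int × List Int) c =>
        (acc.1 ++ [c.1], acc.2.1 ++ [c.2.1], acc.2.2 ++ [c.2.2]))
      (xs, ys, zs)
    = (xs ++ cords.map (·.1), ys ++ cords.map (·.2.1), zs ++ cords.map (·.2.2)) := by
  induction cords generalizing xs ys zs with
  | nil => simp
  | cons c t ih => simp [List.foldl, ih, List.append_assoc]

-- B's loop computes the three running maxima as folds of `max`.
theorem limitesAltLoop_eq (t : List (Int × Int × Int)) (mx my mz : Int) :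
    limitesAltLoop mx my mz t =
      ((t.map (·.1)).foldl max mx, (t.map (·.2.1)).foldl max my,
       (t.map (·.2.2)).foldl max mz) := by
  induction t generalizing mx my mz with
  | nil => simp [limitesAltLoop]
  | cons c r ih =>
      have h1 : (if c.1 > mx then c.1 else mx) = max mx c.1 := by split <;> omega
      have h2 : (if c.2.1 > my then c.2.1 else my) = max my c.2.1 := by split <;> omega
      have h3 : (if c.2.2 > mz then c.2.2 else mz) = max mz c.2.2 := by split <;> omega
      simp only [limitesAltLoop, h1, h2, h3, ih, List.map_cons, List.foldl_cons]

-- ===== VERDICT (by name: the statement is the Claim_ definition above) =====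
theorem limites_spec : Claim_equal_limites := by
  intro cords _ hpre
  unfold Spec_limites limites limites_alt
  match cords with
  | [] => exact absurd rfl hpre
  | c :: t =>
      simp only [limites_foldl_lists, List.nil_append, List.map_cons,
        limitesAltLoop_eq, PySem.List.max?_id_cons, Option.getD_some]
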